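-- pv_equiv track=rewrite | github.com/wassname/epub2audio_xtts | pdtToAudio.py | limit_text_len
-- ===== SOURCE A (Python) =====
-- def limit_text_len(text, max_len=200, seps=['.', ',', '\n', ' ']) -> list:
--     # If the some element of text is too long, divide it in smaller parts using the separators
--     return_text = []
--     i = 0
--     for t in text:
--         if len(t) > max_len:
--             splited = t.split(seps[0])
--
--             # Restore the separators
--             for j in range(0, len(splited)-1):
--                 splited[j] = splited[j] + seps[0]
--
--             # If the split is not good enough, try with the next separator
--             if len(seps) > 1 and len(max(splited, key=len)) > max_len:
--                 splited = limit_text_len(splited, max_len, seps[1:])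
--             return_text = return_text + splited
--         else:
--             return_text.append(t)
--
--         i = i + 1
--
--     return return_text
-- ===== SOURCE B (Python) =====
-- def limit_text_len(text, max_len=200, seps=['.', ',', '\n', ' ']) -> list:
--     # B: breadth-first, level-synchronous refinement of ONE tagged token list, one
--     # separator per round (A recurses per element over the separator list instead).
--     toks = [(t, len(t) > max_len) for t in text]
--     for depth, sep in enumerate(seps):
--         if not any(active for _, active in toks):
--             break
--         last = depth == len(seps) - 1
--         new = []
--         for s, active in toks:
--             if not active:
--                 new.append((s, False))
--             else:
--                 parts = s.split(sep)
--                 parts = [p + sep for p in parts[:-1]] + parts[-1:]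
--                 if last or all(len(p) <= max_len for p in parts):
--                     new.extend((p, False) for p in parts)
--                 else:
--                     new.extend((p, len(p) > max_len) for p in parts)
--         toks = new
--     return [s for s, _ in toks]
-- ===== Notes on version B (the rewrite author's own statement) =====
-- stated objective: alternative
-- what changed: A recurses per over-long element down the separator list, rebuilding piece lists inside the recursion; B is non-recursive: it keeps one flat list of (piece, active) tokens and refines the whole list breadth-first, one separator per round, with an early exit when no token is active.
-- outside the precondition, e.g. on limit_text_len(['a.b'], 2, ['.', '']): A returns ['a.', 'b'], B returns ['a.', 'b']
import Mathlib
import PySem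

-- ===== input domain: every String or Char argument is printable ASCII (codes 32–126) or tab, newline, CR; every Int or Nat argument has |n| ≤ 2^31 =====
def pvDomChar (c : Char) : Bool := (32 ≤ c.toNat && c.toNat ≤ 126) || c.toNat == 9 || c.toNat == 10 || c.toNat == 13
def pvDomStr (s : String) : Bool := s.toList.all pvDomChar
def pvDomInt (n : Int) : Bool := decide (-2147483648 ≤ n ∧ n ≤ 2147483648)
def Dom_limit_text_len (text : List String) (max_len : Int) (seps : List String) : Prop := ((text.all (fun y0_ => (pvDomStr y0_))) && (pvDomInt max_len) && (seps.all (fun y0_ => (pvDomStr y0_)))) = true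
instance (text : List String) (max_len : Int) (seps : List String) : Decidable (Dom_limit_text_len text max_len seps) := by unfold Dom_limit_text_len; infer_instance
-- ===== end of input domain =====

-- B replaces A's per-element recursion over the separator list by a breadth-first,
-- level-synchronous refinement of one tagged token list (objective: alternative).

-- ===== PORT A =====
-- the 'for j in range(0, len(splited)-1): splited[j] = splited[j] + seps[0]' loop,
-- as the obvious structural recursion appending sep to every element except the last
def pvRestore (sep : String) : List String → List String
  | [] => []
  | [x] => [x]
  | x :: y :: t => (x ++ sep) :: pvRestore sep (y :: t)

def limit_text_len (text : List String) (max_len : Int) (seps : List String) : List String :=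
  text.foldl (fun return_text t =>
    if (PySem.Str.len t : Int) > max_len then
      let sep0 := (PySem.List.pyGet? seps 0).getD ""        -- seps[0]; none (IndexError) outside Pre_
      let splited := (PySem.Str.split? t sep0).getD [t]     -- t.split(seps[0]); none (ValueError on '') outside Pre_
      let splited := pvRestore sep0 splited
      let splited :=
        if _h : 1 < seps.length then
          if (PySem.Str.len ((PySem.List.max? splited (fun p => PySem.Str.len p)).getD "") : Int) > max_len then
            limit_text_len splited max_len (seps.drop 1)
          else splited
        else splited
      return_text ++ splited
    else return_text ++ [t]) []
termination_by seps.length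
decreasing_by simp; omega

-- ===== PORT B =====
-- one round of Source B's 'for depth, sep in enumerate(seps)' body: refine every token once
def pvLevelStep (max_len : Int) (sep : String) (last : Bool) (toks : List (String × Bool)) : List (String × Bool) :=
  toks.foldl (fun new p =>
    if !p.2 then new ++ [(p.1, false)]
    else
      let raw := (PySem.Str.split? p.1 sep).getD [p.1]      -- s.split(sep); none (ValueError on '') outside Pre_
      let parts := (PySem.List.slice raw none (some (-1))).map (fun q => q ++ sep)
                     ++ PySem.List.slice raw (some (-1)) none
      if last || parts.all (fun q => decide ((PySem.Str.len q : Int) ≤ max_len)) then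
        new ++ parts.map (fun q => (q, false))
      else
        new ++ parts.map (fun q => (q, decide ((PySem.Str.len q : Int) > max_len)))) []

-- the level loop, one separator per round, with Source B's early 'break' when nothing is active
def pvRefine (max_len : Int) : List String → List (String × Bool) → List (String × Bool)
  | [], toks => toks
  | sep :: rest, toks =>
    if toks.any (fun p => p.2) then
      pvRefine max_len rest (pvLevelStep max_len sep rest.isEmpty toks)
    else toks

def limit_text_len_alt (text : List String) (max_len : Int) (seps : List String) : List String :=
  (pvRefine max_len seps (text.map (fun t => (t, decide ((PySem.Str.len t : Int) > max_len))))).map Prod.fst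

-- ===== PRECONDITION & SPEC =====
-- Pre_ excludes exactly the inputs where A raises (IndexError: seps == [] with an over-long
-- element; ValueError: splitting on an empty-string separator); it is slightly narrower than
-- that reason because reachability of a LATER empty separator depends on how earlier splits
-- turn out, which has no closed form, so an empty separator is excluded wherever it sits.
-- The equality proof itself never uses Pre_ (the Lean ports agree on all of Dom_).
def Pre_limit_text_len (text : List String) (max_len : Int) (seps : List String) : Prop :=
  (∀ t ∈ text, (PySem.Str.len t : Int) ≤ max_len) ∨ (seps ≠ [] ∧ "" ∉ seps)
instance (text : List String) (max_len : Int) (seps : List String) : Decidable (Pre_limit_text_len text max_len seps) := by unfold Pre_limit_text_len; infer_instance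

def pvWitness_limit_text_len : List String × Int × List String := (["hello world. bye"], 6, [".", " "])

def Spec_limit_text_len (text : List String) (max_len : Int) (seps : List String) (out : List String) : Prop := out = limit_text_len_alt text max_len seps
instance (text : List String) (max_len : Int) (seps : List String) (out : List String) : Decidable (Spec_limit_text_len text max_len seps out) := by unfold Spec_limit_text_len; infer_instance

-- ===== CLAIM (what is proved, stated in full; the proofs are below) =====
def Claim_equal_limit_text_len : Prop := ∀ (text : List String) (max_len : Int) (seps : List String), Dom_limit_text_len text max_len seps → Pre_limit_text_len text max_len seps → Spec_limit_text_len text max_len seps (limit_text_len text max_len seps)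

-- ===== LEMMAS AND PROOFS =====

-- a Python str.split never returns an empty list
lemma pvGo_ne_nil (sep : List Char) : ∀ (fuel : Nat) (l cur : List Char) (acc : List (List Char)), PySem.Chars.splitOn.go sep fuel l cur acc ≠ [] := by
  intro fuel
  induction fuel with
  | zero => intro l cur acc; simp [PySem.Chars.splitOn.go]
  | succ n ih =>
    intro l cur acc
    cases l with
    | nil => simp [PySem.Chars.splitOn.go]
    | cons c rest =>
      rw [PySem.Chars.splitOn.go]
      split
      · exact ih _ _ _
      · exact ih _ _ _

lemma pvSplit?_ne_nil (t sep : String) (l : List String) (h : PySem.Str.split? t sep = some l) : l ≠ [] := by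
  unfold PySem.Str.split? PySem.Chars.split? at h
  by_cases he : sep.toList.isEmpty
  · simp [he] at h
  · simp [he] at h
    rcases h with ⟨m, hm, rfl⟩
    simp
    intro hc
    exact pvGo_ne_nil sep.toList _ t.toList [] [] hc

lemma pvRaw_ne_nil (t sep : String) : ((PySem.Str.split? t sep).getD [t]) ≠ [] := by
  cases h : PySem.Str.split? t sep with
  | none => simp
  | some l => simpa using pvSplit?_ne_nil t sep l h

lemma pvRestore_eq (sep : String) : ∀ (xs : List String),
    pvRestore sep xs = xs.dropLast.map (fun p => p ++ sep) ++ xs.drop (xs.length - 1)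
  | [] => rfl
  | [x] => rfl
  | x :: y :: t => by
      simp only [pvRestore, pvRestore_eq sep (y :: t), List.dropLast_cons₂, List.map_cons]
      simp

lemma pvSliceRestore_eq (sep : String) (raw : List String) :
    (PySem.List.slice raw none (some (-1))).map (fun q => q ++ sep)
      ++ PySem.List.slice raw (some (-1)) none = pvRestore sep raw := by
  rw [PySem.List.slice_to_neg_one, PySem.List.slice_from_neg_one, pvRestore_eq]

lemma pvRestore_ne_nil (sep : String) (xs : List String) (h : xs ≠ []) : pvRestore sep xs ≠ [] := by
  cases xs with
  | nil => exact absurd rfl h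
  | cons x t => cases t <;> simp [pvRestore]

-- the 'len(max(parts, key=len)) > max_len' test is 'some part is longer than max_len'
lemma pvMax_gt_iff (max_len : Int) (parts : List String) (h : parts ≠ []) :
    ((PySem.Str.len ((PySem.List.max? parts (fun p => PySem.Str.len p)).getD "") : Int) > max_len)
      ↔ ∃ q ∈ parts, max_len < (PySem.Str.len q : Int) := by
  cases hm : PySem.List.max? parts (fun p => PySem.Str.len p) with
  | none => exact absurd ((PySem.List.max?_eq_none_iff _ _).mp hm) h
  | some m =>
    simp only [Option.getD_some]
    constructor
    · intro hlt; exact ⟨m, PySem.List.max?_mem hm, hlt⟩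
    · rintro ⟨q, hq, hlt⟩
      have := PySem.List.max?_isMax hm q hq
      omega

-- A's per-element behaviour (proof-side characterisation of port A)
def pvProcA (max_len : Int) : List String → String → List String
  | seps, t =>
    if max_len < (PySem.Str.len t : Int) then
      if _h : 1 < seps.length then
        if (PySem.Str.len ((PySem.List.max? (pvRestore ((PySem.List.pyGet? seps 0).getD "") ((PySem.Str.split? t ((PySem.List.pyGet? seps 0).getD "")).getD [t])) (fun p => PySem.Str.len p)).getD "") : Int) > max_len then
          (pvRestore ((PySem.List.pyGet? seps 0).getD "") ((PySem.Str.split? t ((PySem.List.pyGet? seps 0).getD "")).getD [t])).flatMap (fun q => pvProcA max_len (seps.drop 1) q)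
        else pvRestore ((PySem.List.pyGet? seps 0).getD "") ((PySem.Str.split? t ((PySem.List.pyGet? seps 0).getD "")).getD [t])
      else pvRestore ((PySem.List.pyGet? seps 0).getD "") ((PySem.Str.split? t ((PySem.List.pyGet? seps 0).getD "")).getD [t])
    else [t]
termination_by seps => seps.length
decreasing_by simp; omega

lemma pvProcA_short (max_len : Int) (seps : List String) (t : String)
    (h : ¬ max_len < (PySem.Str.len t : Int)) : pvProcA max_len seps t = [t] := by
  rw [pvProcA, if_neg h]

lemma pvProcA_nil (max_len : Int) (t : String) : pvProcA max_len [] t = [t] := by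
  rw [pvProcA]
  split
  · rw [dif_neg (by simp)]
    simp [PySem.List.pyGet?, PySem.List.pyIdx?, PySem.Str.split?, PySem.Chars.split?, pvRestore]
  · rfl

-- one unfolding of port A as a flatMap, given the recursive call already characterised
lemma pvA_body (max_len : Int) (seps : List String)
    (ih : 1 < seps.length → ∀ text, limit_text_len text max_len (seps.drop 1) = text.flatMap (pvProcA max_len (seps.drop 1))) :
    ∀ text, limit_text_len text max_len seps = text.flatMap (pvProcA max_len seps) := by
  intro text
  rw [limit_text_len]
  rw [show (fun (return_text : List String) (t : String) =>
      if (PySem.Str.len t : Int) > max_len then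
        return_text ++ (let sep0 := (PySem.List.pyGet? seps 0).getD ""
          let splited := (PySem.Str.split? t sep0).getD [t]
          let splited := pvRestore sep0 splited
          let splited :=
            if _h : 1 < seps.length then
              if (PySem.Str.len ((PySem.List.max? splited (fun p => PySem.Str.len p)).getD "") : Int) > max_len then
                limit_text_len splited max_len (seps.drop 1)
              else splited
            else splited
          splited)
      else return_text ++ [t])
      = fun return_text t => return_text ++ pvProcA max_len seps t from by
    funext return_text t
    rw [pvProcA]
    dsimp only
    by_cases hl : max_len < (PySem.Str.len t : Int)
    · rw [if_pos hl, if_pos hl]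
      congr 1
      by_cases hlen : 1 < seps.length
      · rw [dif_pos hlen, dif_pos hlen]
        split
        · exact ih hlen _
        · rfl
      · rw [dif_neg hlen, dif_neg hlen]
    · rw [if_neg hl, if_neg hl]]
  rw [PySem.List.foldl_append_eq_flatMap, List.nil_append]

lemma pvA_eq_flatMap (max_len : Int) : ∀ (n : Nat) (seps : List String), seps.length ≤ n →
    ∀ (text : List String), limit_text_len text max_len seps = text.flatMap (pvProcA max_len seps) := by
  intro n
  induction n with
  | zero =>
    intro seps hs
    exact pvA_body max_len seps (fun h => absurd h (by omega))
  | succ m ih =>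
    intro seps hs
    exact pvA_body max_len seps (fun _h => ih (seps.drop 1) (by simp; omega))

-- B's per-token behaviour: one level step as a flatMap
def pvH (max_len : Int) (sep : String) (last : Bool) (p : String × Bool) : List (String × Bool) :=
  if !p.2 then [(p.1, false)]
  else if last || (pvRestore sep ((PySem.Str.split? p.1 sep).getD [p.1])).all (fun q => decide ((PySem.Str.len q : Int) ≤ max_len)) then
    (pvRestore sep ((PySem.Str.split? p.1 sep).getD [p.1])).map (fun q => (q, false))
  else (pvRestore sep ((PySem.Str.split? p.1 sep).getD [p.1])).map (fun q => (q, decide ((PySem.Str.len q : Int) > max_len)))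

lemma pvLevelStep_eq (max_len : Int) (sep : String) (last : Bool) (toks : List (String × Bool)) :
    pvLevelStep max_len sep last toks = toks.flatMap (pvH max_len sep last) := by
  rw [pvLevelStep]
  rw [show (fun (new : List (String × Bool)) (p : String × Bool) =>
      if !p.2 then new ++ [(p.1, false)]
      else
        let raw := (PySem.Str.split? p.1 sep).getD [p.1]
        let parts := (PySem.List.slice raw none (some (-1))).map (fun q => q ++ sep)
                       ++ PySem.List.slice raw (some (-1)) none
        if last || parts.all (fun q => decide ((PySem.Str.len q : Int) ≤ max_len)) then
          new ++ parts.map (fun q => (q, false))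
        else
          new ++ parts.map (fun q => (q, decide ((PySem.Str.len q : Int) > max_len))))
      = fun new p => new ++ pvH max_len sep last p from by
    funext new p
    rw [pvH]
    dsimp only
    rw [pvSliceRestore_eq]
    split
    · rfl
    · split <;> rfl]
  rw [PySem.List.foldl_append_eq_flatMap, List.nil_append]

lemma pvFlatMap_fst {α β : Type} (l : List (α × β)) : l.flatMap (fun p => [p.1]) = l.map Prod.fst := by
  induction l with
  | nil => rfl
  | cons p t ih => simp [ih]

lemma pvFlatMap_procA_if (max_len : Int) (rest : List String) (l : List String) :
    (l.flatMap fun q => if (PySem.Str.len q : Int) > max_len then pvProcA max_len rest q else [q])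
      = l.flatMap (pvProcA max_len rest) := by
  congr 1
  funext q
  split
  · rfl
  · next h => rw [pvProcA_short max_len rest q h]

lemma pvRefine_eq (max_len : Int) : ∀ (seps : List String) (toks : List (String × Bool)),
    (∀ p ∈ toks, p.2 = true → max_len < (PySem.Str.len p.1 : Int)) →
    (pvRefine max_len seps toks).map Prod.fst
      = toks.flatMap (fun p => if p.2 then pvProcA max_len seps p.1 else [p.1]) := by
  intro seps
  induction seps with
  | nil =>
    intro toks _hinv
    rw [pvRefine]
    rw [show (fun p : String × Bool => if p.2 then pvProcA max_len [] p.1 else [p.1])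
        = fun p => [p.1] from funext fun p => by rw [pvProcA_nil]; exact ite_self _]
    rw [pvFlatMap_fst]
  | cons sep rest ih =>
    intro toks hinv
    rw [pvRefine]
    by_cases hany : toks.any (fun p => p.2)
    · rw [if_pos hany, pvLevelStep_eq]
      have hinv' : ∀ p ∈ (toks.flatMap (pvH max_len sep rest.isEmpty)), p.2 = true → max_len < (PySem.Str.len p.1 : Int) := by
        intro p hp
        rcases List.mem_flatMap.mp hp with ⟨q, _hq, hpq⟩
        rw [pvH] at hpq
        split at hpq
        · simp at hpq; simp [hpq]
        · split at hpq
          · rcases List.mem_map.mp hpq with ⟨r, _, rfl⟩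
            simp
          · rcases List.mem_map.mp hpq with ⟨r, _, rfl⟩
            simp
      rw [ih _ hinv', List.flatMap_assoc]
      apply List.flatMap_congr
      intro p hmem
      by_cases hp2 : p.2
      · -- active token: compare one B level + recursion with pvProcA
        have hlong : max_len < (PySem.Str.len p.1 : Int) := hinv p hmem hp2
        rw [pvH, pvProcA]
        simp only [hp2, Bool.not_true, Bool.false_eq_true, if_false, if_pos hlong]
        have hsep0 : (PySem.List.pyGet? (sep :: rest) 0).getD "" = sep := by
          rw [PySem.List.pyGet?_zero_cons]; rfl
        rw [hsep0]
        have hne : pvRestore sep ((PySem.Str.split? p.1 sep).getD [p.1]) ≠ [] :=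
          pvRestore_ne_nil sep _ (pvRaw_ne_nil p.1 sep)
        by_cases hlast : rest = []
        · subst hlast
          rw [dif_neg (by simp)]
          simp only [List.isEmpty_nil, Bool.true_or, if_true, List.flatMap_map]
          simp
        · have hlen : 1 < (sep :: rest).length := by
            cases rest with
            | nil => exact absurd rfl hlast
            | cons a b => simp
          rw [dif_pos hlen]
          have hlaste : rest.isEmpty = false := by simp [hlast]
          rw [hlaste]
          simp only [Bool.false_or, List.drop_one, List.tail_cons]
          by_cases hall : (pvRestore sep ((PySem.Str.split? p.1 sep).getD [p.1])).all (fun q => decide ((PySem.Str.len q : Int) ≤ max_len))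
          · -- every part short: both sides freeze the parts
            have hmax : ¬ ((PySem.Str.len ((PySem.List.max? (pvRestore sep ((PySem.Str.split? p.1 sep).getD [p.1])) (fun p => PySem.Str.len p)).getD "") : Int) > max_len) := by
              rw [pvMax_gt_iff max_len _ hne]
              simp only [List.all_eq_true, decide_eq_true_eq] at hall
              push Not
              intro q hq
              exact hall q hq
            rw [if_pos hall, if_neg hmax, List.flatMap_map]
            simp
          · -- some part still long: both sides refine each part once more
            have hmax : ((PySem.Str.len ((PySem.List.max? (pvRestore sep ((PySem.Str.split? p.1 sep).getD [p.1])) (fun p => PySem.Str.len p)).getD "") : Int) > max_len) := by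
              rw [pvMax_gt_iff max_len _ hne]
              simp only [List.all_eq_true, decide_eq_true_eq, not_forall] at hall
              rcases hall with ⟨q, hq, hql⟩
              exact ⟨q, hq, by omega⟩
            rw [if_neg hall, if_pos hmax, List.flatMap_map]
            dsimp only
            simp only [decide_eq_true_eq]
            exact pvFlatMap_procA_if max_len rest _
      · simp only [Bool.not_eq_true] at hp2
        rw [pvH]
        simp [hp2]
    · rw [if_neg hany]
      simp only [List.any_eq_true, not_exists, not_and, Bool.not_eq_true] at hany
      induction toks with
      | nil => rfl
      | cons p t iht =>
        have hp2 : p.2 = false := by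
          have := hany p (by simp)
          simpa using this
        simp only [List.map_cons, List.flatMap_cons, hp2, Bool.false_eq_true, if_false]
        rw [← iht (fun q hq h2 => hinv q (by simp [hq]) h2) (fun q hq => hany q (by simp [hq]))]
        simp

-- ===== VERDICT (by name: the statement is the Claim_ definition above) =====
theorem limit_text_len_spec : Claim_equal_limit_text_len := by
  intro text max_len seps _hdom _hpre
  unfold Spec_limit_text_len limit_text_len_alt
  rw [pvA_eq_flatMap max_len seps.length seps le_rfl text]
  rw [pvRefine_eq max_len seps _ (by intro p hp h2; rcases List.mem_map.mp hp with ⟨t, _, rfl⟩; simpa using h2)]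
  rw [List.flatMap_map]
  congr 1
  funext t
  dsimp only [Function.comp]
  by_cases ht : max_len < (PySem.Str.len t : Int)
  · rw [if_pos (by simpa using ht)]
  · rw [if_neg (by simpa using ht), pvProcA_short max_len seps t ht]
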